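-- pv_equiv track=rewrite | github.com/nahuelalmeira/dismantlingScaling | python/fast/functions.py | _get_neighbors_ball
-- ===== SOURCE A (Python) =====
-- import queue
--
-- def _get_neighbors_ball(nn_set, v, l):
--     """
--     Finds neighbors ball up to distance 'l' from
--     node 'v' using BFS.
--
--     Arguments:
--         nn_set {list} -- Adjacency list
--         v {int} -- Base node
--         l {int} -- Distance to base node
--
--     Returns:
--         list -- Neighbors ball
--     """
--     Q = queue.Queue()
--     Q.put(v)
--     N = len(nn_set)
--     distances = [-1]*N ## Distances to node v (initially set to -1)
--     distance = 0
--     distances[v] = distance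
--     ball = []
--     while not Q.empty():
--         u = Q.get()
--         distance = distances[u]
--         if distances[u] == l:
--             break
--
--         for nn in nn_set[u]: ## Iterate over neighbors of u
--             if distances[nn] < 0: ## Unseen node
--                 distances[nn] = distance + 1
--                 Q.put(nn)
--                 ball.append(nn)
--
--     return ball
-- ===== SOURCE B (Python) =====
-- def _get_neighbors_ball(nn_set, v, l):
--     """Recursive level expansion: each level's newly discovered nodes are
--     returned as a list and the level lists are concatenated; no queue,
--     no running 'ball' accumulator."""
--     N = len(nn_set)
--     dist = [-1] * N
--     dist[v] = 0
--
--     def discover(u, d):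
--         news = []
--         for nn in nn_set[u]:
--             if dist[nn] < 0:
--                 dist[nn] = d + 1
--                 news.append(nn)
--         return news
--
--     def levels(frontier, d):
--         if not frontier or d == l:
--             return []
--         nxt = [nn for u in frontier for nn in discover(u, d)]
--         return nxt + levels(nxt, d + 1)
--
--     return levels([v], 0)
-- ===== Notes on version B (the rewrite author's own statement) =====
-- stated objective: alternative
-- what changed: Replaces the FIFO queue.Queue BFS with a recursive level expansion: a helper returns each level's newly discovered nodes and the per-level lists are concatenated, with no queue, no running ball accumulator and no next-frontier threading.
-- outside the precondition, e.g. on _get_neighbors_ball([[], [5]], 0, 1): A returns [], B returns []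
import Mathlib
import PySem

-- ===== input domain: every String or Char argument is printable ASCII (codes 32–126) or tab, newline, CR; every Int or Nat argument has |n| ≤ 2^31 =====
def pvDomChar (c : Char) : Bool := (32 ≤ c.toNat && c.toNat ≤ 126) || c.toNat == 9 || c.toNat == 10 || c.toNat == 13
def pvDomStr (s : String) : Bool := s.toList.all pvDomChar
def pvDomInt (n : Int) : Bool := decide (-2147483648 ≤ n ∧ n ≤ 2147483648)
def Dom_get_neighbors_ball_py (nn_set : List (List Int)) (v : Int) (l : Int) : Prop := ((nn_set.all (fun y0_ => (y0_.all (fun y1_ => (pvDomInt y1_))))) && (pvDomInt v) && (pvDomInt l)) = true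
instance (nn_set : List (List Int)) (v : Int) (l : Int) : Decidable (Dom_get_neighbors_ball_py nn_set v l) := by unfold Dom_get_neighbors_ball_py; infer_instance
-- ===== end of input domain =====

-- B replaces A's FIFO queue.Queue BFS by a recursive level expansion that concatenates the
-- per-level lists of newly discovered nodes (objective: alternative decomposition, identical
-- discovery order). Return value only; neither program mutates its arguments.

-- ===== PORT A =====
-- inner 'for nn in nn_set[u]' loop: state (distances, Q-as-list, ball)
def ballNbrA (dist q ball : List Int) (d : Int) : List Int → List Int × List Int × List Int
  | [] => (dist, q, ball)
  | nn :: rest =>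
    match PySem.List.pyGet? dist nn with
    | none => (dist, q, ball)   -- IndexError 'distances[nn]'; outside Pre_
    | some dn =>
      if dn < 0 then
        -- pySetD is exact here: the pyGet? just above succeeded, so the index is in range
        ballNbrA (PySem.List.pySetD dist nn (d + 1)) (q ++ [nn]) (ball ++ [nn]) d rest
      else
        ballNbrA dist q ball d rest

-- 'while not Q.empty()' loop; fuel is only a totality guard (N+1 dequeues always suffice)
def loopA (nn_set : List (List Int)) (l : Int) : Nat → List Int → List Int → List Int → List Int
  | _, [], _, ball => ball
  | 0, _ :: _, _, ball => ball   -- fuel exhausted; never reached under Pre_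
  | fuel + 1, u :: q', dist, ball =>
    match PySem.List.pyGet? dist u with
    | none => ball   -- IndexError 'distances[u]'; outside Pre_
    | some du =>
      if du = l then ball   -- break
      else
        match PySem.List.pyGet? nn_set u with
        | none => ball   -- IndexError 'nn_set[u]'; outside Pre_
        | some nbrs =>
          let t := ballNbrA dist q' ball du nbrs
          loopA nn_set l fuel t.2.1 t.1 t.2.2

def get_neighbors_ball_py (nn_set : List (List Int)) (v : Int) (l : Int) : List Int :=
  match PySem.List.pySet? (List.replicate nn_set.length (-1 : Int)) v 0 with
  | none => []   -- IndexError 'distances[v] = distance'; outside Pre_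
  | some dist => loopA nn_set l (nn_set.length + 1) [v] dist []

-- ===== PORT B =====
-- helper 'discover(u, d)': walk one adjacency row, return (updated dist, newly seen nodes)
def discoverB (dist : List Int) (d : Int) : List Int → List Int × List Int
  | [] => (dist, [])
  | nn :: rest =>
    match PySem.List.pyGet? dist nn with
    | none => (dist, [])   -- IndexError 'dist[nn]'; outside Pre_
    | some dn =>
      if dn < 0 then
        let t := discoverB (PySem.List.pySetD dist nn (d + 1)) d rest
        (t.1, nn :: t.2)
      else
        discoverB dist d rest

-- the comprehension '[nn for u in frontier for nn in discover(u, d)]'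
def levelB (nn_set : List (List Int)) (dist : List Int) (d : Int) : List Int → List Int × List Int
  | [] => (dist, [])
  | u :: rest =>
    match PySem.List.pyGet? nn_set u with
    | none => (dist, [])   -- IndexError 'nn_set[u]'; outside Pre_
    | some nbrs =>
      let t := discoverB dist d nbrs
      let r := levelB nn_set t.1 d rest
      (r.1, t.2 ++ r.2)

-- 'levels(frontier, d)': recursion on levels; fuel is only a totality guard
def levelsB (nn_set : List (List Int)) (l : Int) : Nat → List Int → Int → List Int → List Int
  | 0, _, _, _ => []   -- fuel exhausted; never reached under Pre_
  | fuel + 1, frontier, d, dist =>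
    if frontier = [] ∨ d = l then []
    else
      let t := levelB nn_set dist d frontier
      t.2 ++ levelsB nn_set l fuel t.2 (d + 1) t.1

def get_neighbors_ball_py_alt (nn_set : List (List Int)) (v : Int) (l : Int) : List Int :=
  match PySem.List.pySet? (List.replicate nn_set.length (-1 : Int)) v 0 with
  | none => []   -- IndexError 'dist[v] = 0'; outside Pre_
  | some dist => levelsB nn_set l (nn_set.length + 1) [v] 0 dist

-- ===== PRECONDITION & SPEC =====
-- Pre_ excludes inputs where A raises IndexError (empty nn_set, v out of range, a visited
-- out-of-range adjacency entry).  It is slightly narrower than "A returns": for l ≠ 0 it asks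
-- ALL adjacency entries to be in range, so it also excludes inputs whose out-of-range entries
-- happen never to be visited by the BFS (on those A and B still return the same ball).
def Pre_get_neighbors_ball_py (nn_set : List (List Int)) (v : Int) (l : Int) : Prop :=
  nn_set ≠ [] ∧ PySem.Raise.InRange nn_set.length v ∧
    (l = 0 ∨ ∀ row ∈ nn_set, ∀ nn ∈ row, PySem.Raise.InRange nn_set.length nn)

instance (nn_set : List (List Int)) (v : Int) (l : Int) : Decidable (Pre_get_neighbors_ball_py nn_set v l) := by
  unfold Pre_get_neighbors_ball_py PySem.Raise.InRange; infer_instance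

def pvWitness_get_neighbors_ball_py : List (List Int) × Int × Int := ([[1], [0, 2], [1]], 0, 2)

def Spec_get_neighbors_ball_py (nn_set : List (List Int)) (v : Int) (l : Int) (out : List Int) : Prop := out = get_neighbors_ball_py_alt nn_set v l
instance (nn_set : List (List Int)) (v : Int) (l : Int) (out : List Int) : Decidable (Spec_get_neighbors_ball_py nn_set v l out) := by unfold Spec_get_neighbors_ball_py; infer_instance

-- ===== CLAIM (what is proved, stated in full; the proofs are below) =====
def Claim_equal_get_neighbors_ball_py : Prop := ∀ (nn_set : List (List Int)) (v : Int) (l : Int), Dom_get_neighbors_ball_py nn_set v l → Pre_get_neighbors_ball_py nn_set v l → Spec_get_neighbors_ball_py nn_set v l (get_neighbors_ball_py nn_set v l)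

-- ===== LEMMAS AND PROOFS =====

-- Python index normalised to a Nat index
def toIx (n : Nat) (i : Int) : Nat := if 0 ≤ i then i.toNat else n - (-i).toNat

-- number of still-unseen entries (< 0) of the distances array
def negC (xs : List Int) : Nat := xs.countP (fun x => decide (x < 0))

lemma toIx_lt {n : Nat} {i : Int} (h : PySem.Raise.InRange n i) : toIx n i < n := by
  rcases h with ⟨h1, h2⟩; unfold toIx; split_ifs with h0 <;> omega

lemma pyIdx?_ir {n : Nat} {i : Int} (h : PySem.Raise.InRange n i) :
    PySem.List.pyIdx? n i = some (toIx n i) := by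
  rcases h with ⟨h1, h2⟩
  simp only [PySem.List.pyIdx?, toIx]
  split_ifs <;> rfl

lemma pyGet?_ir {α : Type} {xs : List α} {i : Int} (h : PySem.Raise.InRange xs.length i) :
    PySem.List.pyGet? xs i = xs[toIx xs.length i]? := by
  simp [PySem.List.pyGet?, pyIdx?_ir h]

lemma pySetD_ir {α : Type} {xs : List α} {i : Int} (v : α) (h : PySem.Raise.InRange xs.length i) :
    PySem.List.pySetD xs i v = xs.set (toIx xs.length i) v := by
  simp [PySem.List.pySetD, PySem.List.pySet?, pyIdx?_ir h]

lemma inRange_of_pyGet?_some {α : Type} {xs : List α} {i : Int} {x : α}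
    (h : PySem.List.pyGet? xs i = some x) : PySem.Raise.InRange xs.length i := by
  by_contra hc
  rw [(PySem.List.pyGet?_eq_none_iff (xs := xs) (i := i)).2 hc] at h
  simp at h

lemma negC_set {xs : List Int} {k : Nat} {v : Int}
    (hk : k < xs.length) (hneg : xs[k] < 0) (hv : 0 ≤ v) :
    negC (xs.set k v) + 1 = negC xs := by
  induction xs generalizing k with
  | nil => simp at hk
  | cons x t ih =>
    cases k with
    | zero =>
      simp only [List.getElem_cons_zero] at hneg
      simp only [List.set_cons_zero, negC, List.countP_cons]
      simp only [decide_eq_true_eq]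
      rw [if_pos hneg, if_neg (by omega)]
    | succ k =>
      simp only [List.getElem_cons_succ] at hneg
      simp only [List.length_cons] at hk
      simp only [List.set_cons_succ, negC, List.countP_cons]
      have := ih (k := k) (by omega) hneg
      unfold negC at this
      omega

-- characterisation of A's inner neighbour loop in terms of B's 'discover'
lemma discover_spec (d : Int) (hd : 0 ≤ d) :
    ∀ (nbrs dist : List Int),
      (∀ nn ∈ nbrs, PySem.Raise.InRange dist.length nn) →
      (∀ q ball, ballNbrA dist q ball d nbrs =
          ((discoverB dist d nbrs).1, q ++ (discoverB dist d nbrs).2, ball ++ (discoverB dist d nbrs).2)) ∧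
      (discoverB dist d nbrs).1.length = dist.length ∧
      (∀ j m, PySem.List.pyGet? dist j = some m → 0 ≤ m →
          PySem.List.pyGet? (discoverB dist d nbrs).1 j = some m) ∧
      (∀ x ∈ (discoverB dist d nbrs).2,
          PySem.Raise.InRange dist.length x ∧
          PySem.List.pyGet? (discoverB dist d nbrs).1 x = some (d + 1)) ∧
      negC (discoverB dist d nbrs).1 + (discoverB dist d nbrs).2.length ≤ negC dist := by
  intro nbrs
  induction nbrs with
  | nil =>
    intro dist _
    exact ⟨by simp [ballNbrA, discoverB], rfl, fun j m h _ => h, by simp [discoverB], by simp [discoverB]⟩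
  | cons nn rest ih =>
    intro dist hin
    have hnn : PySem.Raise.InRange dist.length nn := hin nn (by simp)
    set k := toIx dist.length nn with hkdef
    have hk : k < dist.length := toIx_lt hnn
    have hget : PySem.List.pyGet? dist nn = some dist[k] := by
      rw [pyGet?_ir hnn, ← hkdef]; simp [hk]
    by_cases hneg : dist[k] < 0
    · -- unseen: mark it and recurse
      set dist1 := dist.set k (d + 1) with h1def
      have hlen1 : dist1.length = dist.length := by simp [h1def]
      obtain ⟨heq, hlen', hpres, hnew, hcnt⟩ :=
        ih dist1 (by intro x hx; rw [hlen1]; exact hin x (by simp [hx]))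
      have hunf : discoverB dist d (nn :: rest) =
          ((discoverB dist1 d rest).1, nn :: (discoverB dist1 d rest).2) := by
        simp only [discoverB, hget, if_pos hneg, pySetD_ir _ hnn, ← hkdef, ← h1def]
      rw [hunf]
      refine ⟨?_, by rw [hlen', hlen1], ?_, ?_, ?_⟩
      · intro q ball
        simp only [ballNbrA, hget, if_pos hneg, pySetD_ir _ hnn, ← hkdef, ← h1def, heq,
          List.append_assoc, List.cons_append, List.nil_append]
      · intro j m hj hm
        have hjr : PySem.Raise.InRange dist.length j := inRange_of_pyGet?_some hj
        have hj' : dist[toIx dist.length j]? = some m := by rw [← pyGet?_ir hjr]; exact hj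
        have hne : k ≠ toIx dist.length j := by
          intro hEq
          rw [← hEq, List.getElem?_eq_getElem hk] at hj'
          have hdm : dist[k] = m := by simpa using hj'
          rw [hdm] at hneg
          omega
        have hj1 : PySem.List.pyGet? dist1 j = some m := by
          rw [pyGet?_ir (show PySem.Raise.InRange dist1.length j by rw [hlen1]; exact hjr)]
          have hix : toIx dist1.length j = toIx dist.length j := by rw [hlen1]
          rw [hix, h1def, List.getElem?_set_ne hne, hj']
        exact hpres j m hj1 hm
      · have hmark : PySem.List.pyGet? (discoverB dist1 d rest).1 nn = some (d + 1) := by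
          have h0 : PySem.List.pyGet? dist1 nn = some (d + 1) := by
            rw [pyGet?_ir (show PySem.Raise.InRange dist1.length nn by rw [hlen1]; exact hnn)]
            have hix : toIx dist1.length nn = k := by rw [hlen1, hkdef]
            rw [hix, h1def, List.getElem?_set_self hk]
          exact hpres nn (d + 1) h0 (by omega)
        intro x hx
        rcases List.mem_cons.1 hx with hx | hx
        · rw [hx]; exact ⟨hnn, hmark⟩
        · obtain ⟨h1, h2⟩ := hnew x hx
          exact ⟨by rwa [hlen1] at h1, h2⟩
      · have := negC_set hk hneg (v := d + 1) (by omega)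
        rw [← h1def] at this
        simp only [List.length_cons]
        omega
    · -- already seen: skip
      obtain ⟨heq, hlen', hpres, hnew, hcnt⟩ := ih dist (fun x hx => hin x (List.mem_cons_of_mem _ hx))
      have hunf : discoverB dist d (nn :: rest) = discoverB dist d rest := by
        simp only [discoverB, hget, if_neg hneg]
      rw [hunf]
      refine ⟨?_, hlen', hpres, hnew, hcnt⟩
      intro q ball
      simp only [ballNbrA, hget, if_neg hneg, heq]

lemma levelsB_nil (nn_set : List (List Int)) (l : Int) (fuel : Nat) (d : Int) (dist : List Int) :
    levelsB nn_set l fuel [] d dist = [] := by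
  cases fuel <;> simp [levelsB]

lemma levelsB_stop (nn_set : List (List Int)) (l : Int) (fuel : Nat) (fr dist : List Int) :
    levelsB nn_set l fuel fr l dist = [] := by
  cases fuel <;> simp [levelsB]

lemma loopA_nil (nn_set : List (List Int)) (l : Int) (fuel : Nat) (dist ball : List Int) :
    loopA nn_set l fuel [] dist ball = ball := by
  cases fuel <;> simp [loopA]

-- the simulation: A's queue is always (rest of current level) ++ (next level so far),
-- and everything A still appends is one whole level of B plus B's remaining levels
lemma loop_eq (nn_set : List (List Int)) (l : Int)
    (hall : ∀ row ∈ nn_set, ∀ nn ∈ row, PySem.Raise.InRange nn_set.length nn) :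
    ∀ (n fuelA fuelB : Nat) (f g dist ball : List Int) (d : Int),
      2 * fuelA + (if g = [] then 0 else 1) ≤ n →
      dist.length = nn_set.length →
      0 ≤ d → d ≠ l →
      (∀ u ∈ f, PySem.Raise.InRange nn_set.length u ∧ PySem.List.pyGet? dist u = some d) →
      (∀ u ∈ g, PySem.Raise.InRange nn_set.length u ∧ PySem.List.pyGet? dist u = some (d + 1)) →
      f.length + g.length + negC dist ≤ fuelA →
      1 + negC dist + (if g = [] then 0 else 1) ≤ fuelB →
      loopA nn_set l fuelA (f ++ g) dist ball =
        ball ++ ((levelB nn_set dist d f).2 ++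
          levelsB nn_set l fuelB (g ++ (levelB nn_set dist d f).2) (d + 1) (levelB nn_set dist d f).1) := by
  intro n
  induction n using Nat.strong_induction_on with
  | _ n ih =>
    intro fuelA fuelB f g dist ball d hn hlen hd hdl hf hg hA hB
    cases f with
    | nil =>
      simp only [List.nil_append, levelB, List.append_nil]
      by_cases hgnil : g = []
      · subst hgnil; rw [loopA_nil, levelsB_nil]; simp
      · by_cases hstop : d + 1 = l
        · -- next level is exactly l: A dequeues its head and breaks, B's guard fires
          obtain ⟨u, g', rfl⟩ := List.exists_cons_of_ne_nil hgnil
          have hu := hg u (by simp)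
          obtain ⟨fA, rfl⟩ : ∃ fA, fuelA = fA + 1 := by
            cases fuelA with
            | zero => exfalso; simp only [List.length_nil, List.length_cons] at hA; omega
            | succ fA => exact ⟨fA, rfl⟩
          rw [← hstop, levelsB_stop]
          have hu2 := hu.2
          rw [hstop] at hu2
          simp [loopA, hu2, hstop]
        · -- move to the next level
          obtain ⟨fB, rfl⟩ : ∃ fB, fuelB = fB + 1 := by
            cases fuelB with
            | zero => exfalso; simp only [if_neg hgnil] at hB; omega
            | succ fB => exact ⟨fB, rfl⟩
          rw [show levelsB nn_set l (fB + 1) g (d + 1) dist =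
              (levelB nn_set dist (d + 1) g).2 ++
                levelsB nn_set l fB (levelB nn_set dist (d + 1) g).2 (d + 1 + 1)
                  (levelB nn_set dist (d + 1) g).1 from by
            rw [levelsB, if_neg (by simp [hgnil, hstop])]]
          have := ih (2 * fuelA) (by rw [if_neg hgnil] at hn; omega) fuelA fB g [] dist ball (d + 1)
            (by simp) hlen (by omega) hstop hg (by simp)
            (by simpa using hA) (by simp only [if_neg hgnil] at hB; simpa using hB)
          simp only [List.append_nil, List.nil_append] at this
          rw [this]
    | cons u f' =>
      have hu := hf u (by simp)
      obtain ⟨fA, rfl⟩ : ∃ fA, fuelA = fA + 1 := by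
        cases fuelA with
        | zero => exfalso; simp only [List.length_cons] at hA; omega
        | succ fA => exact ⟨fA, rfl⟩
      have hku : toIx nn_set.length u < nn_set.length := toIx_lt hu.1
      have hnb : PySem.List.pyGet? nn_set u = some nn_set[toIx nn_set.length u] := by
        rw [pyGet?_ir hu.1]; simp [hku]
      have hmem : nn_set[toIx nn_set.length u] ∈ nn_set := List.getElem_mem hku
      obtain ⟨heq, hlen', hpres, hnew, hcnt⟩ :=
        discover_spec d hd nn_set[toIx nn_set.length u] dist
          (by intro nn hnn; rw [hlen]; exact hall _ hmem nn hnn)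
      set dist' := (discoverB dist d nn_set[toIx nn_set.length u]).1 with hd'
      set new := (discoverB dist d nn_set[toIx nn_set.length u]).2 with hnewdef
      have hkey := ih (2 * fA + 1) (by split at hn <;> omega) fA fuelB f' (g ++ new) dist'
        (ball ++ new) d (by split <;> omega) (by rw [hlen', hlen]) hd hdl
        (fun x hx => ⟨(hf x (List.mem_cons_of_mem _ hx)).1,
          hpres x d (hf x (List.mem_cons_of_mem _ hx)).2 hd⟩)
        (by
          intro x hx
          rcases List.mem_append.1 hx with hx | hx
          · exact ⟨(hg x hx).1, hpres x (d + 1) (hg x hx).2 (by omega)⟩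
          · obtain ⟨h1, h2⟩ := hnew x hx
            exact ⟨by rwa [hlen] at h1, h2⟩)
        (by simp only [List.length_cons, List.length_append] at hA ⊢; omega)
        (by
          have hiff : g ++ new = [] ↔ g = [] ∧ new = [] := List.append_eq_nil_iff
          by_cases hg0 : g = []
          · by_cases hn0 : new = []
            · rw [if_pos (hiff.2 ⟨hg0, hn0⟩)]; rw [if_pos hg0] at hB; omega
            · have h1 : 1 ≤ new.length :=
                Nat.pos_of_ne_zero (fun h => hn0 (List.length_eq_zero_iff.1 h))
              rw [if_neg (fun h => hn0 (hiff.1 h).2)]; rw [if_pos hg0] at hB; omega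
          · rw [if_neg (fun h => hg0 (hiff.1 h).1)]; rw [if_neg hg0] at hB; omega)
      have hballs : ballNbrA dist (f' ++ g) ball d nn_set[toIx nn_set.length u] =
          (dist', (f' ++ g) ++ new, ball ++ new) := heq (f' ++ g) ball
      rw [show levelB nn_set dist d (u :: f') =
          ((levelB nn_set dist' d f').1, new ++ (levelB nn_set dist' d f').2) from by
        simp only [levelB, hnb, ← hd', ← hnewdef]]
      simp only [List.cons_append, loopA, hu.2, if_neg hdl, hnb, hballs]
      rw [List.append_assoc f' g new, hkey]
      simp only [List.append_assoc]

-- ===== VERDICT (by name: the statement is the Claim_ definition above) =====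
theorem get_neighbors_ball_py_spec : Claim_equal_get_neighbors_ball_py := by
  intro nn_set v l _ hPre
  obtain ⟨hne, hv, hl⟩ := hPre
  unfold Spec_get_neighbors_ball_py get_neighbors_ball_py get_neighbors_ball_py_alt
  have hN : 0 < nn_set.length := by
    cases nn_set with
    | nil => exact absurd rfl hne
    | cons a t => simp
  have hk : toIx nn_set.length v < nn_set.length := toIx_lt hv
  have hset : PySem.List.pySet? (List.replicate nn_set.length (-1 : Int)) v 0 =
      some ((List.replicate nn_set.length (-1 : Int)).set (toIx nn_set.length v) 0) := by
    unfold PySem.List.pySet?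
    rw [List.length_replicate, pyIdx?_ir hv]
    rfl
  rw [hset]
  dsimp only
  set dist1 := (List.replicate nn_set.length (-1 : Int)).set (toIx nn_set.length v) 0 with hd1
  have hlen1 : dist1.length = nn_set.length := by simp [hd1]
  have hget1 : PySem.List.pyGet? dist1 v = some 0 := by
    rw [pyGet?_ir (show PySem.Raise.InRange dist1.length v by rw [hlen1]; exact hv)]
    have hix : toIx dist1.length v = toIx nn_set.length v := by rw [hlen1]
    rw [hix, hd1, List.getElem?_set_self (by simp [hk])]
  have hnegc : negC dist1 + 1 = nn_set.length := by
    have h0 : negC (List.replicate nn_set.length (-1 : Int)) = nn_set.length := by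
      unfold negC
      rw [List.countP_eq_length.2 (by
        intro a ha
        rw [List.eq_of_mem_replicate ha]
        decide)]
      simp
    have h1 := negC_set (xs := List.replicate nn_set.length (-1 : Int))
      (k := toIx nn_set.length v) (v := 0) (by simp [hk]) (by simp) le_rfl
    rw [← hd1] at h1
    omega
  by_cases hl0 : l = 0
  · subst hl0
    have hA : loopA nn_set 0 (nn_set.length + 1) [v] dist1 [] = [] := by
      simp [loopA, hget1]
    have hB : levelsB nn_set 0 (nn_set.length + 1) [v] 0 dist1 = [] := by
      simp [levelsB]
    rw [hA, hB]
  · have hall : ∀ row ∈ nn_set, ∀ nn ∈ row, PySem.Raise.InRange nn_set.length nn :=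
      hl.resolve_left hl0
    rw [show levelsB nn_set l (nn_set.length + 1) [v] 0 dist1 =
        (levelB nn_set dist1 0 [v]).2 ++
          levelsB nn_set l nn_set.length (levelB nn_set dist1 0 [v]).2 1
            (levelB nn_set dist1 0 [v]).1 from by
      rw [levelsB, if_neg (not_or.2 ⟨by simp, fun h => hl0 h.symm⟩)]; rfl]
    have hA' : ([v] : List Int).length + ([] : List Int).length + negC dist1 ≤ nn_set.length + 1 := by
      simp only [List.length_cons, List.length_nil]
      omega
    have hB' : 1 + negC dist1 + (if ([] : List Int) = [] then (0 : Nat) else 1) ≤ nn_set.length := by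
      rw [if_pos rfl]
      omega
    have hn' : 2 * (nn_set.length + 1) + (if ([] : List Int) = [] then (0 : Nat) else 1) ≤ 2 * (nn_set.length + 1) := by
      rw [if_pos rfl]
      omega
    have hf' : ∀ u ∈ ([v] : List Int), PySem.Raise.InRange nn_set.length u ∧ PySem.List.pyGet? dist1 u = some 0 := by
      intro u hu
      rw [List.mem_singleton] at hu
      subst hu
      exact ⟨hv, hget1⟩
    have hg' : ∀ u ∈ ([] : List Int), PySem.Raise.InRange nn_set.length u ∧ PySem.List.pyGet? dist1 u = some (0 + 1) := by
      simp
    have := loop_eq nn_set l hall (2 * (nn_set.length + 1)) (nn_set.length + 1)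
      nn_set.length [v] [] dist1 [] 0
      hn' hlen1 le_rfl (fun h => hl0 h.symm) hf' hg' hA' hB'
    simpa using this
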